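-- pv_equiv track=rewrite | github.com/sashi8a/CS313E | recursion2.py | groupNoAdj
-- ===== SOURCE A (Python) =====
-- def groupNoAdj(start, nums, target):
--
--     if start<len(nums):
--
--         element = nums[start]
--
--     if(start > len(nums)-1):
--         return target == 0 #returns true if the sum of values in nums is equal to target, false if not
--
--     else: #if start is an index within nums
--
--         if (groupNoAdj(start+2, nums, target-element)): #if start is an index in nums return true if groupNoAdj at 2 indicies after with target-element is true.
--             return True
--
--         return groupNoAdj(start+1, nums, target) #return groupNoAdj starting at the next index with no difference in the value of target.
-- ===== SOURCE B (Python) =====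
-- def groupNoAdj(start, nums, target):
--     n = len(nums)
--     if start > n - 1:
--         return target == 0
--     # bottom-up DP: s1 / s2 = sets of sums reachable by a non-adjacent
--     # selection from index i+1 / i+2 onward; duplicates collapse in the sets
--     s1, s2 = {0}, {0}
--     for i in range(n - 1, start - 1, -1):
--         s1, s2 = s1 | {nums[i] + s for s in s2}, s1
--     return target in s1
-- ===== Notes on version B (the rewrite author's own statement) =====
-- stated objective: alternative
-- what changed: replaced the top-down exponential branch recursion by an iterative bottom-up DP that carries two sets of distinct reachable sums and tests target membership at the end (intended to collapse equal partial sums; a timing run could not confirm a speedup, so none is claimed)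
import Mathlib
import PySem

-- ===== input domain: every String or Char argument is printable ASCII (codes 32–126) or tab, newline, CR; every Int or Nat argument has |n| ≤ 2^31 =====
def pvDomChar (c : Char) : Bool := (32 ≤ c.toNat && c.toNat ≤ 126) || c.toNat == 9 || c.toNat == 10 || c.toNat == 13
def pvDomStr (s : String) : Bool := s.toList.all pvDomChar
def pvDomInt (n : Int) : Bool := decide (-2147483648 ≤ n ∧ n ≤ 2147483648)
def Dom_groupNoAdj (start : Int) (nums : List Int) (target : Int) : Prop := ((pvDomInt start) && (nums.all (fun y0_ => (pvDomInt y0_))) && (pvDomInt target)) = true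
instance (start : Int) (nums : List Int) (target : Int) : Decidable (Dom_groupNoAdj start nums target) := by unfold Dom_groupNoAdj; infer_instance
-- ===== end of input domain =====

-- B replaces A's exponential branch recursion by an iterative bottom-up DP over two sets of distinct reachable sums.


-- ===== PORT A =====
def groupNoAdj (start : Int) (nums : List Int) (target : Int) : Bool :=
  if _h : start > (nums.length : Int) - 1 then decide (target = 0)
  else
    match PySem.List.pyGet? nums start with
    | none => false   -- Python raises IndexError here (start < -len(nums)); excluded by Pre_
    | some element =>
      if groupNoAdj (start + 2) nums (target - element) then true
      else groupNoAdj (start + 1) nums target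
termination_by ((nums.length : Int) - start).toNat
decreasing_by all_goals omega

-- ===== PORT B =====
def groupNoAdj_alt (start : Int) (nums : List Int) (target : Int) : Bool :=
  let n : Int := nums.length
  if start > n - 1 then decide (target = 0)
  else
    let p := (PySem.List.pyRange (n - 1) (start - 1) (-1)).foldl
      (fun (p : PySem.Set Int × PySem.Set Int) i =>
        (PySem.Set.union p.1 (p.2.map (fun s => PySem.List.pyGetD nums i 0 + s)), p.1))
      ([0], [0])
    PySem.Set.contains p.1 target

-- ===== PRECONDITION & SPEC =====
-- Pre_ excludes exactly the inputs where Python A raises IndexError: nums[start] with start < -len(nums) (B raises there too).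
def Pre_groupNoAdj (start : Int) (nums : List Int) (target : Int) : Prop :=
  -(nums.length : Int) ≤ start
instance (start : Int) (nums : List Int) (target : Int) : Decidable (Pre_groupNoAdj start nums target) := by unfold Pre_groupNoAdj; infer_instance
def pvWitness_groupNoAdj : Int × List Int × Int := (0, ([2, 7, 5] : List Int), 9)

def Spec_groupNoAdj (start : Int) (nums : List Int) (target : Int) (out : Bool) : Prop := out = groupNoAdj_alt start nums target
instance (start : Int) (nums : List Int) (target : Int) (out : Bool) : Decidable (Spec_groupNoAdj start nums target out) := by unfold Spec_groupNoAdj; infer_instance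

-- ===== CLAIM (what is proved, stated in full; the proofs are below) =====
def Claim_equal_groupNoAdj : Prop := ∀ (start : Int) (nums : List Int) (target : Int), Dom_groupNoAdj start nums target → Pre_groupNoAdj start nums target → Spec_groupNoAdj start nums target (groupNoAdj start nums target)

-- ===== LEMMAS AND PROOFS =====

-- An in-range (possibly negative) Python index: pyGet? succeeds and returns the pyGetD value.
theorem pyGet?_eq_some_getD (nums : List Int) (i : Int)
    (h1 : -(nums.length : Int) ≤ i) (h2 : i ≤ (nums.length : Int) - 1) :
    PySem.List.pyGet? nums i = some (PySem.List.pyGetD nums i 0) := by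
  simp only [PySem.List.pyGet?, PySem.List.pyGetD, PySem.List.pyIdx?]
  split_ifs with h3 h4
  · simp only [Option.bind_some]; rw [List.getElem?_eq_getElem (by omega)]; simp
  · omega
  · simp only [Option.bind_some]; rw [List.getElem?_eq_getElem (by omega)]; simp

-- A past the end is the base test target == 0.
theorem groupNoAdj_base (start : Int) (nums : List Int) (target : Int)
    (h : (nums.length : Int) - 1 < start) :
    groupNoAdj start nums target = decide (target = 0) := by
  rw [groupNoAdj]; simp [h]

-- One step of A at an in-range index, with the element written via pyGetD.
theorem groupNoAdj_step (start : Int) (nums : List Int) (target : Int)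
    (h1 : -(nums.length : Int) ≤ start) (h2 : start ≤ (nums.length : Int) - 1) :
    groupNoAdj start nums target =
      (groupNoAdj (start + 2) nums (target - PySem.List.pyGetD nums start 0)
        || groupNoAdj (start + 1) nums target) := by
  rw [groupNoAdj]
  rw [pyGet?_eq_some_getD nums start h1 h2]
  simp only [dif_neg (by omega : ¬ start > (nums.length : Int) - 1)]
  split_ifs with hh <;> simp [hh]

-- Loop invariant of B's backward fold: entering index a with sets describing
-- indices a+1 and a+2, the final first set describes index b+1.
theorem fold_inv (nums : List Int) (b : Int) (hb : -(nums.length : Int) ≤ b + 1) :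
    ∀ (k : Nat) (a : Int) (s1 s2 : PySem.Set Int), a = b + (k : Int) →
      a ≤ (nums.length : Int) - 1 →
      (∀ t, t ∈ s1 ↔ groupNoAdj (a + 1) nums t = true) →
      (∀ t, t ∈ s2 ↔ groupNoAdj (a + 2) nums t = true) →
      ∀ t, t ∈ ((PySem.List.pyRange a b (-1)).foldl
          (fun (p : PySem.Set Int × PySem.Set Int) i =>
            (PySem.Set.union p.1 (p.2.map (fun s => PySem.List.pyGetD nums i 0 + s)), p.1))
          (s1, s2)).1
        ↔ groupNoAdj (b + 1) nums t = true := by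
  intro k
  induction k with
  | zero =>
    intro a s1 s2 hak hle h1 h2 t
    have hab : a = b := by omega
    rw [PySem.List.pyRange_neg_one_eq_nil (by omega), List.foldl_nil]
    rw [← hab]; exact h1 t
  | succ k ih =>
    intro a s1 s2 hak hle h1 h2 t
    have hba : b < a := by push_cast at hak; omega
    rw [PySem.List.pyRange_neg_one_cons hba, List.foldl_cons]
    refine ih (a - 1) _ s1 (by push_cast at hak ⊢; omega) (by omega) ?_ ?_ t
    · intro u
      have hstep := groupNoAdj_step a nums u (by omega) hle
      rw [show a - 1 + 1 = a by ring, hstep, Bool.or_eq_true]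
      have hx : (∃ s ∈ s2, PySem.List.pyGetD nums a 0 + s = u) ↔
          (u - PySem.List.pyGetD nums a 0) ∈ s2 := by
        constructor
        · rintro ⟨s, hs, rfl⟩; simpa using hs
        · intro h; exact ⟨_, h, by ring⟩
      simp only [PySem.Set.mem_union, List.mem_map]
      rw [hx, h1 u, h2 (u - PySem.List.pyGetD nums a 0)]
      tauto
    · intro u
      rw [show a - 1 + 2 = a + 1 by ring]
      exact h1 u

-- ===== VERDICT (by name: the statement is the Claim_ definition above) =====
theorem groupNoAdj_spec : Claim_equal_groupNoAdj := by
  intro start nums target _hdom hpre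
  show groupNoAdj start nums target = groupNoAdj_alt start nums target
  unfold groupNoAdj_alt
  simp only []
  by_cases hst : start > (nums.length : Int) - 1
  · rw [if_pos hst, groupNoAdj_base _ _ _ (by omega)]
  · rw [if_neg hst]
    have hpre' : -(nums.length : Int) ≤ start := hpre
    have key := fold_inv nums (start - 1) (by omega)
      (((nums.length : Int) - start).toNat) ((nums.length : Int) - 1)
      [0] [0] (by omega) (by omega)
      (fun t => by
        rw [show (nums.length : Int) - 1 + 1 = (nums.length : Int) by ring,
          groupNoAdj_base _ _ _ (by omega)]
        simp)
      (fun t => by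
        rw [show (nums.length : Int) - 1 + 2 = (nums.length : Int) + 1 by ring,
          groupNoAdj_base _ _ _ (by omega)]
        simp)
      target
    rw [show start - 1 + 1 = start by ring] at key
    apply Bool.coe_iff_coe.mp
    rw [PySem.Set.contains_iff]
    exact key.symm
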